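-- pv_equiv track=rewrite | github.com/IIIIIIIvy/RFCN | Operations/CLP/TGT CLP/TGT_CLP_template.py | splitCLP
-- ===== SOURCE A (Python) =====
-- CLP_DICT={
--     '<66':'CFS',
--     '>=66':'40HQ'
-- }
--
-- def splitCLP(ttl_cbm,temp_res):
--     if ttl_cbm>=66:
--         box_qty=int(ttl_cbm/66)
--         temp_res+=str(box_qty)+'*'+CLP_DICT['>=66']
--         ttl_cbm=ttl_cbm%66
--     else:
--         temp_res+=CLP_DICT['<66']
--         ttl_cbm-=66
--
--     temp_res+=','
--     if ttl_cbm>0: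
--         temp_res = splitCLP(ttl_cbm,temp_res)
--     return temp_res
-- ===== SOURCE B (Python) =====
-- CLP_DICT = {
--     '<66': 'CFS',
--     '>=66': '40HQ'
-- }
--
-- def splitCLP(ttl_cbm, temp_res):
--     # Closed form: at most one "q*40HQ" part, plus a trailing "CFS" part
--     # whenever there is a (positive) remainder below 66.
--     if ttl_cbm < 66:
--         return temp_res + CLP_DICT['<66'] + ','
--     q, r = divmod(ttl_cbm, 66)
--     out = temp_res + str(q) + '*' + CLP_DICT['>=66'] + ','
--     if r > 0:
--         out += CLP_DICT['<66'] + ','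
--     return out
-- ===== Notes on version B (the rewrite author's own statement) =====
-- stated objective: simpler
-- what changed: Replaces A's tail recursion by a non-recursive closed form: since the remainder after one division by 66 is below 66, the result is the single '<q>*40HQ,' part plus an optional trailing 'CFS,' when the remainder is positive.
import Mathlib
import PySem

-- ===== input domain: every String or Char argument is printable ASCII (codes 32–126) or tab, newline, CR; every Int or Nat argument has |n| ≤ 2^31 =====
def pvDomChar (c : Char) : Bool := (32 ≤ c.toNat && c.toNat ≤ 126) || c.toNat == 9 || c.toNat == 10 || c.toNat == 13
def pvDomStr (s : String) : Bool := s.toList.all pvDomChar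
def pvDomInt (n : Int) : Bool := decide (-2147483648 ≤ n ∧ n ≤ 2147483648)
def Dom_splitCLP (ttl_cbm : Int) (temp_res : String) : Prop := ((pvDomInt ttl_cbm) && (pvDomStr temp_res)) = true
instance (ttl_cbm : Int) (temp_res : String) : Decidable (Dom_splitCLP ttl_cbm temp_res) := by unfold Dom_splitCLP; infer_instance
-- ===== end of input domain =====

-- B replaces A's tail recursion by a non-recursive closed form (one division, optional trailing "CFS," part): simpler.


-- ===== PORT A =====
def splitCLP (ttl_cbm : Int) (temp_res : String) : String :=
  -- Python reassigns ttl_cbm/temp_res; the reassigned values are r/t here.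
  if h : ttl_cbm ≥ 66 then
    -- box_qty = int(ttl_cbm/66): ttl_cbm ≥ 66 > 0, so truncation = floor division (exact on Dom)
    let box_qty := PySem.Int.floordiv ttl_cbm 66
    let t := temp_res ++ PySem.Int.toStr box_qty ++ "*" ++ "40HQ"
    let r := PySem.Int.mod ttl_cbm 66
    let t := t ++ ","
    if h2 : r > 0 then splitCLP r t else t
  else
    let t := temp_res ++ "CFS"
    let r := ttl_cbm - 66
    let t := t ++ ","
    if h2 : r > 0 then splitCLP r t else t
termination_by ttl_cbm.toNat
decreasing_by
  · have h1 : 0 ≤ PySem.Int.mod ttl_cbm 66 := PySem.Int.mod_nonneg ttl_cbm (by norm_num)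
    have h3 : PySem.Int.mod ttl_cbm 66 < 66 := PySem.Int.mod_lt ttl_cbm (by norm_num)
    simp only [r] at h2
    omega
  · simp only [r] at h2
    omega

-- ===== PORT B =====
def splitCLP_alt (ttl_cbm : Int) (temp_res : String) : String :=
  if ttl_cbm < 66 then temp_res ++ "CFS" ++ ","
  else
    let q := PySem.Int.floordiv ttl_cbm 66
    let r := PySem.Int.mod ttl_cbm 66
    let out := temp_res ++ PySem.Int.toStr q ++ "*" ++ "40HQ" ++ ","
    if r > 0 then out ++ ("CFS" ++ ",") else out

-- ===== PRECONDITION & SPEC =====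
def Spec_splitCLP (ttl_cbm : Int) (temp_res : String) (out : String) : Prop := out = splitCLP_alt ttl_cbm temp_res
instance (ttl_cbm : Int) (temp_res : String) (out : String) : Decidable (Spec_splitCLP ttl_cbm temp_res out) := by unfold Spec_splitCLP; infer_instance

-- ===== CLAIM (what is proved, stated in full; the proofs are below) =====
def Claim_equal_splitCLP : Prop := ∀ (ttl_cbm : Int) (temp_res : String), Dom_splitCLP ttl_cbm temp_res → Spec_splitCLP ttl_cbm temp_res (splitCLP ttl_cbm temp_res)

-- ===== LEMMAS AND PROOFS =====

-- ===== VERDICT (by name: the statement is the Claim_ definition above) =====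
theorem splitCLP_spec : Claim_equal_splitCLP := by
  intro ttl_cbm temp_res _
  unfold Spec_splitCLP splitCLP splitCLP_alt
  by_cases h : ttl_cbm ≥ 66
  · have h1 : 0 ≤ PySem.Int.mod ttl_cbm 66 := PySem.Int.mod_nonneg ttl_cbm (by norm_num)
    have h2 : PySem.Int.mod ttl_cbm 66 < 66 := PySem.Int.mod_lt ttl_cbm (by norm_num)
    simp only [dif_pos h, if_neg (by omega : ¬ ttl_cbm < 66)]
    by_cases hr : PySem.Int.mod ttl_cbm 66 > 0
    · rw [dif_pos hr]
      unfold splitCLP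
      rw [dif_neg (by omega : ¬ PySem.Int.mod ttl_cbm 66 ≥ 66),
          dif_neg (by omega : ¬ PySem.Int.mod ttl_cbm 66 - 66 > 0)]
      rw [if_pos hr]
      simp [String.append_assoc]
    · rw [dif_neg hr, if_neg hr]
  · simp only [dif_neg h, if_pos (by omega : ttl_cbm < 66),
      dif_neg (by omega : ¬ ttl_cbm - 66 > 0)]
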